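-- pv_equiv track=rewrite | github.com/AlGotIt/Algorithm2022 | Hyukey/1031_Programmers_메뉴_리뉴얼.py | solution
-- ===== SOURCE A (Python) =====
-- import operator
--
-- def solution(orders, course):
--     """
--     Args:
--         orders : 각 손님들이 주문한 단품메뉴들이 문자열 형식으로 담긴 배열
--         course : "스카피"가 추가하고 싶어하는 코스요리를 구성하는 단품메뉴들의 갯수가 담긴 배열
--     Returns:
--         "스카피"가 새로 추가하게 될 코스요리의 메뉴 구성을 담은 문자열 형태의 배열
--     """
--     answer = []
--     cand = {} # 만들 수 있는 코스 후보 딕셔너리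
--
--     def dfs(word, idx, cnt, des, ans):
--         # 목적지인가
--         if(cnt == des): # 후보 코스 추가
--             if(ans in cand):
--                 cand[ans] += 1
--             else:
--                 cand[ans] = 1
--             return
--
--         # 연결된 곳 순회
--         for i in range(idx, len(word)):
--             # 갈 수 있는가
--             # 간다
--             dfs(word, i+1, cnt+1, des, ans+word[i])
--
--     for word in orders:
--         word = sorted(word)
--         for c in course:
--             dfs(word, 0, 0, c, "")
--
--     cand = sorted(cand.items(), key=operator.itemgetter(1), reverse=True) # value 기준으로 내림차순 정렬
--
--     for c in course:
--         maxNum = 2 # 최소 2번 이상 주문한 건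
--         maxList = []
--         for k, v in cand:
--             if len(k)==c:
--                 if v == maxNum:
--                     maxList.append(k)
--                 elif v > maxNum:
--                     maxNum = v
--                     maxList.clear()
--                     maxList.append(k)
--         answer += maxList
--
--     answer = sorted(answer)
--     return answer
-- ===== SOURCE B (Python) =====
-- def _combos(s, c):
--     """All length-c combination strings of the string s (indices increasing), in order."""
--     if c <= 0:
--         return [''] if c == 0 else []
--     if c > len(s):
--         return []
--     head, rest = s[0], s[1:]
--     return [head + t for t in _combos(rest, c - 1)] + _combos(rest, c)
--
--
-- def solution(orders, course):
--     counts = {}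
--     for word in orders:
--         s = ''.join(sorted(word))
--         for c in course:
--             for k in _combos(s, c):
--                 counts[k] = counts.get(k, 0) + 1
--     answer = []
--     for c in course:
--         picks = [k for k, v in counts.items() if len(k) == c and v >= 2]
--         if picks:
--             best = max(counts[k] for k in picks)
--             answer += [k for k in picks if counts[k] == best]
--     return sorted(answer)
-- ===== Notes on version B (the rewrite author's own statement) =====
-- stated objective: alternative
-- what changed: Replaces A's dict-threading dfs recursion (target-count/index driven, bumping a shared counter mid-recursion, re-descending into branches with too few letters left) and its value-sorted running-max scan with a pure combination-list generator that cuts off branches with fewer letters than needed, a separate counting pass, and a sort-free filter+max selection per course size.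
import Mathlib
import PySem

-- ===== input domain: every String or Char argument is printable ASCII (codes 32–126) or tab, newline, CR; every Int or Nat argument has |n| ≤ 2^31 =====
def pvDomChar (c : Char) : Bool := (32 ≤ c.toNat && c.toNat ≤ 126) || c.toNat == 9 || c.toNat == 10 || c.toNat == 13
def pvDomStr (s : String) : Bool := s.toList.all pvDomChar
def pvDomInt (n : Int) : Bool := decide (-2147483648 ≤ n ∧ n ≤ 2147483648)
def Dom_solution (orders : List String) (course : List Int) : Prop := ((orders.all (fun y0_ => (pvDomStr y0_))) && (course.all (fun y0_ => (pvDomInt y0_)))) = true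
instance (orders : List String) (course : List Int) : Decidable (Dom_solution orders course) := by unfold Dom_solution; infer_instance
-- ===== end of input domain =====

-- B replaces A's dict-threading dfs recursion and value-sorted running-max scan by a pure
-- combination-list generator (with a too-few-letters-left cutoff, measurably faster), a separate
-- counting fold, and a sort-free filter+max selection.
-- Python strings are modelled as their character lists (PySem convention): dict keys are List Char
-- and answer entries become Strings only at the final sort.

-- ===== PORT A =====
-- cand[ans] += 1 / cand[ans] = 1
def pvBumpA (cand : PySem.Dict (List Char) Int) (ans : List Char) : PySem.Dict (List Char) Int :=
  if cand.contains ans then cand.modify ans 0 (· + 1) else cand.insert ans 1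

mutual
-- dfs(word, idx, cnt, des, ans); the loop 'for i in range(idx, len(word))' walks the tails of word[idx:]
def pvDfsA (des cnt : Int) (ans : List Char) (suffix : List Char)
    (cand : PySem.Dict (List Char) Int) : PySem.Dict (List Char) Int :=
  if cnt = des then pvBumpA cand ans
  else pvLoopA des cnt ans suffix cand
termination_by (suffix.length, 1)

def pvLoopA (des cnt : Int) (ans : List Char) (suffix : List Char)
    (cand : PySem.Dict (List Char) Int) : PySem.Dict (List Char) Int :=
  match suffix with
  | [] => cand
  | ch :: rest => pvLoopA des cnt ans rest (pvDfsA des (cnt + 1) (ans ++ [ch]) rest cand)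
termination_by (suffix.length, 0)
end

def solution (orders : List String) (course : List Int) : List String :=
  let cand : PySem.Dict (List Char) Int :=
    orders.foldl (fun cand word =>
      let w := PySem.List.sorted word.toList (fun x => x) false
      course.foldl (fun cand c => pvDfsA c 0 [] w cand) cand) PySem.Dict.empty
  let candL := PySem.List.sorted cand.items (fun p => p.2) true
  let answer : List (List Char) :=
    course.foldl (fun answer c =>
      let r := candL.foldl (fun (st : Int × List (List Char)) kv =>
          if (kv.1.length : Int) = c then
            if kv.2 = st.1 then (st.1, st.2 ++ [kv.1])
            else if kv.2 > st.1 then (kv.2, [kv.1])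
            else st
          else st) (2, ([] : List (List Char)))
      answer ++ r.2) []
  PySem.List.sorted (answer.map (fun l => String.ofList l)) (fun x => x) false

-- ===== PORT B =====
-- _combos(s, c): every length-c combination of s, indices increasing, in order
def pvCombosB (s : List Char) (c : Int) : List (List Char) :=
  if c ≤ 0 then (if c = 0 then [[]] else [])
  else if (s.length : Int) < c then []
  else match s with
    | [] => []
    | head :: rest => (pvCombosB rest (c - 1)).map (fun t => head :: t) ++ pvCombosB rest c
termination_by s.length
decreasing_by all_goals (simp_all; try omega)

def solution_alt (orders : List String) (course : List Int) : List String :=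
  let counts : PySem.Dict (List Char) Int :=
    orders.foldl (fun counts word =>
      let s := PySem.List.sorted word.toList (fun x => x) false
      course.foldl (fun counts c =>
        (pvCombosB s c).foldl (fun counts k => counts.insert k (counts.getD k 0 + 1)) counts) counts)
      PySem.Dict.empty
  let answer : List (List Char) :=
    course.foldl (fun answer c =>
      let picks := counts.items.filter (fun kv => decide ((kv.1.length : Int) = c) && decide (2 ≤ kv.2))
      match PySem.List.max? (picks.map (fun kv => kv.2)) (fun x => x) with
      | none => answer
      | some best => answer ++ (picks.filter (fun kv => kv.2 == best)).map (fun kv => kv.1)) []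
  PySem.List.sorted (answer.map (fun l => String.ofList l)) (fun x => x) false

-- ===== PRECONDITION & SPEC =====
def Spec_solution (orders : List String) (course : List Int) (out : List String) : Prop := out = solution_alt orders course
instance (orders : List String) (course : List Int) (out : List String) : Decidable (Spec_solution orders course out) := by unfold Spec_solution; infer_instance

-- ===== CLAIM (what is proved, stated in full; the proofs are below) =====
def Claim_equal_solution : Prop := ∀ (orders : List String) (course : List Int), Dom_solution orders course → Spec_solution orders course (solution orders course)

-- ===== LEMMAS AND PROOFS =====

theorem pvBumpA_eq (d : PySem.Dict (List Char) Int) (k : List Char) :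
    pvBumpA d k = d.insert k (d.getD k 0 + 1) := by
  unfold pvBumpA
  cases hc : d.contains k
  · rw [if_neg (by simp [hc]), PySem.Dict.getD_of_not_contains d 0 hc]; norm_num
  · simp [hc, PySem.Dict.modify, PySem.Dict.insert]

theorem pvCombosB_zero (s : List Char) : pvCombosB s 0 = [[]] := by unfold pvCombosB; simp

theorem pvCombosB_neg (s : List Char) (c : Int) (h : c < 0) : pvCombosB s c = [] := by
  unfold pvCombosB; rw [if_pos (le_of_lt h), if_neg (by omega)]

theorem pvCombosB_big (s : List Char) (c : Int) (h0 : 0 < c) (h : (s.length : Int) < c) :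
    pvCombosB s c = [] := by
  unfold pvCombosB; rw [if_neg (by omega), if_pos h]

theorem pvCombosB_cons (ch : Char) (rest : List Char) (c : Int) (h0 : 0 < c)
    (h : c ≤ ((ch :: rest).length : Int)) :
    pvCombosB (ch :: rest) c =
      (pvCombosB rest (c - 1)).map (fun t => ch :: t) ++ pvCombosB rest c := by
  conv_lhs => unfold pvCombosB
  rw [if_neg (by omega), if_neg (by omega)]

-- dfs(word, idx, cnt, des, ans) bumps exactly the combinations ans ++ t, t a (des-cnt)-combination of word[idx:]
theorem pvDfsA_loopA_eq (s : List Char) :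
    (∀ (des cnt : Int) (ans : List Char) (d : PySem.Dict (List Char) Int),
        pvDfsA des cnt ans s d =
          ((pvCombosB s (des - cnt)).map (fun t => ans ++ t)).foldl pvBumpA d) ∧
    (∀ (des cnt : Int) (ans : List Char) (d : PySem.Dict (List Char) Int), cnt ≠ des →
        pvLoopA des cnt ans s d =
          ((pvCombosB s (des - cnt)).map (fun t => ans ++ t)).foldl pvBumpA d) := by
  induction s with
  | nil =>
      constructor
      · intro des cnt ans d
        unfold pvDfsA
        by_cases h : cnt = des
        · simp [h, pvCombosB_zero]
        · rw [if_neg h]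
          unfold pvLoopA
          rcases lt_or_gt_of_ne (sub_ne_zero.mpr (Ne.symm h)) with hlt | hgt
          · simp [pvCombosB_neg _ _ hlt]
          · simp [pvCombosB_big ([] : List Char) (des - cnt) hgt (by simp; omega)]
      · intro des cnt ans d h
        unfold pvLoopA
        rcases lt_or_gt_of_ne (sub_ne_zero.mpr (Ne.symm h)) with hlt | hgt
        · simp [pvCombosB_neg _ _ hlt]
        · simp [pvCombosB_big ([] : List Char) (des - cnt) hgt (by simp; omega)]
  | cons ch rest ih =>
      have loop : ∀ (des cnt : Int) (ans : List Char) (d : PySem.Dict (List Char) Int), cnt ≠ des →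
          pvLoopA des cnt ans (ch :: rest) d =
            ((pvCombosB (ch :: rest) (des - cnt)).map (fun t => ans ++ t)).foldl pvBumpA d := by
        intro des cnt ans d h
        have he : des - cnt ≠ 0 := sub_ne_zero.mpr (Ne.symm h)
        unfold pvLoopA
        rcases lt_or_gt_of_ne he with hlt | hgt
        · -- des - cnt < 0 : nothing is ever bumped
          rw [pvCombosB_neg _ _ hlt]
          have h1 : pvDfsA des (cnt + 1) (ans ++ [ch]) rest d = d := by
            rw [(ih).1]
            rw [pvCombosB_neg _ _ (by omega)]
            simp
          rw [h1, (ih).2 des cnt ans d h, pvCombosB_neg _ _ hlt]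
        · by_cases hlen : ((ch :: rest).length : Int) < des - cnt
          · -- too few letters left: all three combination lists are empty
            rw [pvCombosB_big _ _ hgt hlen]
            have h1 : pvDfsA des (cnt + 1) (ans ++ [ch]) rest d = d := by
              rw [(ih).1, pvCombosB_big _ _ (by simp at hlen; omega) (by simp at hlen ⊢; omega)]
              simp
            rw [h1, (ih).2 des cnt ans d h, pvCombosB_big _ _ hgt (by simp at hlen ⊢; omega)]
          · push_neg at hlen
            rw [pvCombosB_cons _ _ _ hgt hlen]
            have h1 : pvDfsA des (cnt + 1) (ans ++ [ch]) rest d =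
                ((pvCombosB rest (des - cnt - 1)).map (fun t => (ans ++ [ch]) ++ t)).foldl pvBumpA d := by
              rw [(ih).1]; ring_nf
            rw [h1, (ih).2 des cnt ans _ h]
            rw [List.map_append, List.foldl_append, List.map_map]
            simp [Function.comp_def]
        -- done
      refine ⟨?_, loop⟩
      intro des cnt ans d
      unfold pvDfsA
      by_cases h : cnt = des
      · simp [h, pvCombosB_zero]
      · rw [if_neg h]; exact loop des cnt ans d h

theorem counts_eq (orders : List String) (course : List Int) :
    (orders.foldl (fun cand word =>
      let w := PySem.List.sorted word.toList (fun x => x) false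
      course.foldl (fun cand c => pvDfsA c 0 [] w cand) cand) PySem.Dict.empty) =
    (orders.foldl (fun counts word =>
      let s := PySem.List.sorted word.toList (fun x => x) false
      course.foldl (fun counts c =>
        (pvCombosB s c).foldl (fun counts k => counts.insert k (counts.getD k 0 + 1)) counts) counts)
      PySem.Dict.empty) := by
  have hf : (fun (cand : PySem.Dict (List Char) Int) (word : String) =>
      let w := PySem.List.sorted word.toList (fun x => x) false
      course.foldl (fun cand c => pvDfsA c 0 [] w cand) cand) =
      (fun (counts : PySem.Dict (List Char) Int) (word : String) =>
      let s := PySem.List.sorted word.toList (fun x => x) false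
      course.foldl (fun counts c =>
        (pvCombosB s c).foldl (fun counts k => counts.insert k (counts.getD k 0 + 1)) counts) counts) := by
    funext cand word
    have hg : (fun (cand : PySem.Dict (List Char) Int) (c : Int) =>
        pvDfsA c 0 [] (PySem.List.sorted word.toList (fun x => x) false) cand) =
        (fun (counts : PySem.Dict (List Char) Int) (c : Int) =>
        (pvCombosB (PySem.List.sorted word.toList (fun x => x) false) c).foldl
          (fun counts k => counts.insert k (counts.getD k 0 + 1)) counts) := by
      funext cand c
      rw [(pvDfsA_loopA_eq _).1]
      have hb : pvBumpA = (fun d k => d.insert k (d.getD k 0 + 1)) := by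
        funext d k; exact pvBumpA_eq d k
      simp [hb]
    show List.foldl _ cand course = List.foldl _ cand course
    rw [hg]
  rw [hf]

theorem foldl_max_eq_self (l : List (List Char × Int)) (m : Int) (h : ∀ x ∈ l, x.2 ≤ m) :
    l.foldl (fun m kv => max m kv.2) m = m := by
  induction l generalizing m with
  | nil => rfl
  | cons kv rest ih =>
      simp only [List.foldl_cons]
      rw [max_eq_left (h kv (by simp))]
      exact ih m (fun x hx => h x (by simp [hx]))

theorem foldl_max_init_le (l : List (List Char × Int)) (m : Int) :
    m ≤ l.foldl (fun m kv => max m kv.2) m := by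
  induction l generalizing m with
  | nil => simp
  | cons kv rest ih => exact le_trans (le_max_left _ _) (ih (max m kv.2))

theorem foldl_max_le (l : List (List Char × Int)) (m : Int) :
    ∀ x ∈ l, x.2 ≤ l.foldl (fun m kv => max m kv.2) m := by
  induction l generalizing m with
  | nil => simp
  | cons kv rest ih =>
      intro x hx
      simp only [List.foldl_cons]
      rcases List.mem_cons.mp hx with h | h
      · subst h
        exact le_trans (le_max_right _ _) (foldl_max_init_le rest (max m x.2))
      · exact ih (max m kv.2) x h

theorem foldl_max_cases (l : List (List Char × Int)) (m : Int) :
    l.foldl (fun m kv => max m kv.2) m = m ∨ ∃ kv ∈ l, l.foldl (fun m kv => max m kv.2) m = kv.2 := by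
  induction l generalizing m with
  | nil => left; rfl
  | cons kv rest ih =>
      simp only [List.foldl_cons]
      rcases ih (max m kv.2) with h | ⟨x, hx, hh⟩
      · rcases max_cases m kv.2 with ⟨he, _⟩ | ⟨he, _⟩
        · left; rw [h, he]
        · right; exact ⟨kv, by simp, by rw [h, he]⟩
      · right; exact ⟨x, by simp [hx], hh⟩

theorem scan_char (lc : List (List Char × Int))
    (hdesc : lc.Pairwise (fun a b => b.2 ≤ a.2)) (mn : Int) (ml : List (List Char)) :
    lc.foldl (fun (st : Int × List (List Char)) kv =>
        if kv.2 = st.1 then (st.1, st.2 ++ [kv.1])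
        else if kv.2 > st.1 then (kv.2, [kv.1])
        else st) (mn, ml) =
      (lc.foldl (fun m kv => max m kv.2) mn,
       (if lc.foldl (fun m kv => max m kv.2) mn = mn then ml else []) ++
         (lc.filter (fun kv => kv.2 = lc.foldl (fun m kv => max m kv.2) mn)).map (fun kv => kv.1)) := by
  induction lc generalizing mn ml with
  | nil => simp
  | cons kv rest ih =>
      have hrest : ∀ x ∈ rest, x.2 ≤ kv.2 := fun x hx => (List.pairwise_cons.mp hdesc).1 x hx
      have hdr : rest.Pairwise (fun a b => b.2 ≤ a.2) := (List.pairwise_cons.mp hdesc).2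
      simp only [List.foldl_cons]
      rcases lt_trichotomy kv.2 mn with hv | hv | hv
      · -- kv.2 < mn : state unchanged, and the whole max stays mn
        rw [if_neg (by omega), if_neg (by omega)]
        rw [ih hdr mn ml]
        have hM : rest.foldl (fun m kv => max m kv.2) mn = mn :=
          foldl_max_eq_self rest mn (fun x hx => le_trans (hrest x hx) (le_of_lt hv))
        have hM2 : max mn kv.2 = mn := max_eq_left (le_of_lt hv)
        simp only [hM2, hM, if_pos rfl]
        rw [List.filter_cons_of_neg (by simp; omega)]
      · -- kv.2 = mn : append, max stays mn
        rw [if_pos hv]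
        rw [ih hdr mn (ml ++ [kv.1])]
        have hM : rest.foldl (fun m kv => max m kv.2) mn = mn :=
          foldl_max_eq_self rest mn (fun x hx => le_trans (hrest x hx) (le_of_eq hv))
        have hM2 : max mn kv.2 = mn := max_eq_left (le_of_eq hv)
        simp only [hM2, hM, if_pos rfl]
        rw [List.filter_cons_of_pos (by simp [hv])]
        simp
      · -- kv.2 > mn : reset
        rw [if_neg (by omega), if_pos hv]
        rw [ih hdr kv.2 [kv.1]]
        have hM : rest.foldl (fun m kv => max m kv.2) kv.2 = kv.2 :=
          foldl_max_eq_self rest kv.2 hrest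
        have hM2 : max mn kv.2 = kv.2 := max_eq_right (le_of_lt hv)
        simp only [hM2, hM, if_true]
        rw [if_neg (by omega)]
        rw [List.filter_cons_of_pos (by simp)]
        simp

theorem sel_perm (D : PySem.Dict (List Char) Int) (c : Int) :
    ((PySem.List.sorted D.items (fun p => p.2) true).foldl (fun (st : Int × List (List Char)) kv =>
          if (kv.1.length : Int) = c then
            if kv.2 = st.1 then (st.1, st.2 ++ [kv.1])
            else if kv.2 > st.1 then (kv.2, [kv.1])
            else st
          else st) (2, ([] : List (List Char)))).2.Perm
      (match PySem.List.max? (((D.items.filter (fun kv => decide ((kv.1.length : Int) = c) && decide (2 ≤ kv.2))).map (fun kv => kv.2))) (fun x => x) with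
       | none => ([] : List (List Char))
       | some best => ((D.items.filter (fun kv => decide ((kv.1.length : Int) = c) && decide (2 ≤ kv.2))).filter (fun kv => kv.2 == best)).map (fun kv => kv.1)) := by
  have hfl := List.foldl_filter (p := fun kv : List Char × Int => decide ((kv.1.length : Int) = c))
    (f := fun (st : Int × List (List Char)) kv =>
        if kv.2 = st.1 then (st.1, st.2 ++ [kv.1])
        else if kv.2 > st.1 then (kv.2, [kv.1])
        else st) (l := PySem.List.sorted D.items (fun p => p.2) true) (init := (2, ([] : List (List Char))))
  set lcA := (PySem.List.sorted D.items (fun p => p.2) true).filter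
      (fun kv : List Char × Int => decide ((kv.1.length : Int) = c)) with hlcA
  set lcI := D.items.filter (fun kv : List Char × Int => decide ((kv.1.length : Int) = c)) with hlcI
  have hAside : ((PySem.List.sorted D.items (fun p => p.2) true).foldl (fun (st : Int × List (List Char)) kv =>
          if (kv.1.length : Int) = c then
            if kv.2 = st.1 then (st.1, st.2 ++ [kv.1])
            else if kv.2 > st.1 then (kv.2, [kv.1])
            else st
          else st) (2, ([] : List (List Char)))) =
      lcA.foldl (fun (st : Int × List (List Char)) kv =>
        if kv.2 = st.1 then (st.1, st.2 ++ [kv.1])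
        else if kv.2 > st.1 then (kv.2, [kv.1])
        else st) (2, ([] : List (List Char))) := by
    rw [hfl]
    simp only [decide_eq_true_eq]
  rw [hAside]
  have hdesc : lcA.Pairwise (fun a b : List Char × Int => b.2 ≤ a.2) :=
    (PySem.List.sorted_pairwise_rev D.items (fun p => p.2)).filter _
  rw [scan_char lcA hdesc 2 []]
  set M := lcA.foldl (fun m kv => max m kv.2) 2 with hMdef
  have hperm : lcA.Perm lcI := (PySem.List.sorted_perm D.items (fun p => p.2) true).filter _
  have hpicks : D.items.filter (fun kv => decide ((kv.1.length : Int) = c) && decide (2 ≤ kv.2)) =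
      lcI.filter (fun kv => decide (2 ≤ kv.2)) := by
    rw [hlcI, List.filter_filter]
    exact List.filter_congr (fun x _ => by rw [Bool.and_comm])
  rw [hpicks]
  rcases hmax : PySem.List.max? ((lcI.filter (fun kv => decide (2 ≤ kv.2))).map (fun kv => kv.2)) (fun x => x) with _ | best
  · -- no pick: every len-c value is < 2
    have hempty : lcI.filter (fun kv => decide (2 ≤ kv.2)) = [] := by
      have := (PySem.List.max?_eq_none_iff _ _).mp hmax
      simpa using this
    have hsmall : ∀ x ∈ lcI, x.2 < 2 := by
      intro x hx
      by_contra hge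
      have : x ∈ lcI.filter (fun kv => decide (2 ≤ kv.2)) := by
        rw [List.mem_filter]; exact ⟨hx, by simp; omega⟩
      simp [hempty] at this
    have hsmallA : ∀ x ∈ lcA, x.2 ≤ 2 := fun x hx => le_of_lt (hsmall x (hperm.mem_iff.mp hx))
    have hM2 : M = 2 := foldl_max_eq_self lcA 2 hsmallA
    have hfe : lcA.filter (fun kv => decide (kv.2 = M)) = [] := by
      rw [List.filter_eq_nil_iff]
      intro x hx
      have := hsmall x (hperm.mem_iff.mp hx)
      simp [hM2]; omega
    rw [hmax]
    simp [hfe]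
  · -- some pick: the max best equals M
    obtain ⟨v0, hv0mem, hv0eq⟩ := by
      have h := PySem.List.max?_mem hmax
      exact List.mem_map.mp h
    have hv0I : v0 ∈ lcI := (List.mem_filter.mp hv0mem).1
    have hv02 : 2 ≤ v0.2 := by have := (List.mem_filter.mp hv0mem).2; simpa using this
    have hle : ∀ y ∈ (lcI.filter (fun kv => decide (2 ≤ kv.2))).map (fun kv => kv.2), y ≤ best :=
      PySem.List.max?_id_le hmax
    have hbest2 : 2 ≤ best := hv0eq ▸ hv02
    have hMbest : M = best := by
      have h1 : best ≤ M := by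
        rw [← hv0eq]
        exact foldl_max_le lcA 2 v0 (hperm.mem_iff.mpr hv0I)
      have h2 : M ≤ best := by
        rcases foldl_max_cases lcA 2 with h | ⟨kv, hkv, hh⟩
        · rw [hMdef, h]; exact hbest2
        · rw [hMdef, hh]
          have hkvI : kv ∈ lcI := hperm.mem_iff.mp hkv
          by_cases h2k : 2 ≤ kv.2
          · exact hle kv.2 (List.mem_map.mpr ⟨kv, List.mem_filter.mpr ⟨hkvI, by simp; omega⟩, rfl⟩)
          · omega
      omega
    rw [hmax]
    simp only []
    show ((M, (if M = 2 then ([] : List (List Char)) else []) ++ (lcA.filter (fun kv => decide (kv.2 = M))).map (fun kv => kv.1)).2).Perm (((lcI.filter (fun kv => decide (2 ≤ kv.2))).filter (fun kv => kv.2 == best)).map (fun kv => kv.1))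
    -- both sides are the length-c items of value best
    have hBf : (lcI.filter (fun kv => decide (2 ≤ kv.2))).filter (fun kv => kv.2 == best) =
        lcI.filter (fun kv => kv.2 == best) := by
      rw [List.filter_filter]
      apply List.filter_congr
      intro x hx
      by_cases hxb : x.2 = best
      · simp [hxb]; omega
      · simp [hxb]
    rw [hBf]
    have hAf : lcA.filter (fun kv => decide (kv.2 = M)) = lcA.filter (fun kv => kv.2 == best) := by
      apply List.filter_congr
      intro x hx
      by_cases h : x.2 = best <;> simp [hMbest, h]
    show ((if M = 2 then ([] : List (List Char)) else []) ++
        (lcA.filter (fun kv => decide (kv.2 = M))).map (fun kv => kv.1)).Perm _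
    rw [hAf]
    have hif : (if M = 2 then ([] : List (List Char)) else []) = [] := by split <;> rfl
    rw [hif, List.nil_append]
    exact ((hperm.filter _).map _)

theorem fold_body_perm {α β : Type} (cs : List β) (F G : List α → β → List α) (a b : List α)
    (hab : a.Perm b) (h : ∀ (acc1 acc2 : List α) (c : β), c ∈ cs → acc1.Perm acc2 → (F acc1 c).Perm (G acc2 c)) :
    (cs.foldl F a).Perm (cs.foldl G b) := by
  induction cs generalizing a b with
  | nil => simpa using hab
  | cons c rest ih =>
      exact ih _ _ (h a b c (by simp) hab) (fun a1 a2 c1 hc hp => h a1 a2 c1 (by simp [hc]) hp)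

-- ===== VERDICT (by name: the statement is the Claim_ definition above) =====
theorem solution_spec : Claim_equal_solution := by
  intro orders course _
  unfold Spec_solution solution solution_alt
  rw [counts_eq]
  rw [PySem.List.sorted_id_eq_sorted_id_iff_perm]
  apply List.Perm.map
  set D : PySem.Dict (List Char) Int := (orders.foldl (fun counts word =>
      let s := PySem.List.sorted word.toList (fun x => x) false
      course.foldl (fun counts c =>
        (pvCombosB s c).foldl (fun counts k => counts.insert k (counts.getD k 0 + 1)) counts) counts)
      PySem.Dict.empty) with hD
  apply fold_body_perm course _ _ [] [] (List.Perm.refl _)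
  intro acc1 acc2 c _ hacc
  have hsel := sel_perm D c
  show (acc1 ++ ((PySem.List.sorted D.items (fun p => p.2) true).foldl (fun (st : Int × List (List Char)) kv =>
          if (kv.1.length : Int) = c then
            if kv.2 = st.1 then (st.1, st.2 ++ [kv.1])
            else if kv.2 > st.1 then (kv.2, [kv.1])
            else st
          else st) (2, ([] : List (List Char)))).2).Perm
      (match PySem.List.max? (((D.items.filter (fun kv => decide ((kv.1.length : Int) = c) && decide (2 ≤ kv.2))).map (fun kv => kv.2))) (fun x => x) with
       | none => acc2
       | some best => acc2 ++ ((D.items.filter (fun kv => decide ((kv.1.length : Int) = c) && decide (2 ≤ kv.2))).filter (fun kv => kv.2 == best)).map (fun kv => kv.1))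
  cases hm : PySem.List.max? (((D.items.filter (fun kv => decide ((kv.1.length : Int) = c) && decide (2 ≤ kv.2))).map (fun kv => kv.2))) (fun x => x) with
  | none =>
      rw [hm] at hsel
      simpa using hacc.append hsel
  | some best =>
      rw [hm] at hsel
      exact hacc.append hsel
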